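-- pv_equiv track=rewrite | github.com/mkl-314/RoPaSci360 | classes/GameBoard.py | separate_tokens
-- ===== SOURCE A (Python) =====
-- def separate_tokens(tokens):
--     r_tokens = []
--     p_tokens = []
--     s_tokens= []
--
--     for token in tokens:
--         if token[0] == "r":
--             r_tokens.append(token)
--         elif token[0] == "p":
--             p_tokens.append(token)
--         elif token[0] == "s":
--             s_tokens.append(token)
--
--     return r_tokens, p_tokens, s_tokens
-- ===== SOURCE B (Python) =====
-- def separate_tokens(tokens):
--     return ([t for t in tokens if t[0] == "r"],
--             [t for t in tokens if t[0] == "p"],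
--             [t for t in tokens if t[0] == "s"])
-- ===== Notes on version B (the rewrite author's own statement) =====
-- stated objective: idiomatic
-- what changed: Replaces the single-pass if/elif accumulation into three mutable lists by three independent filtering comprehensions, one per token type.
import Mathlib
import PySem

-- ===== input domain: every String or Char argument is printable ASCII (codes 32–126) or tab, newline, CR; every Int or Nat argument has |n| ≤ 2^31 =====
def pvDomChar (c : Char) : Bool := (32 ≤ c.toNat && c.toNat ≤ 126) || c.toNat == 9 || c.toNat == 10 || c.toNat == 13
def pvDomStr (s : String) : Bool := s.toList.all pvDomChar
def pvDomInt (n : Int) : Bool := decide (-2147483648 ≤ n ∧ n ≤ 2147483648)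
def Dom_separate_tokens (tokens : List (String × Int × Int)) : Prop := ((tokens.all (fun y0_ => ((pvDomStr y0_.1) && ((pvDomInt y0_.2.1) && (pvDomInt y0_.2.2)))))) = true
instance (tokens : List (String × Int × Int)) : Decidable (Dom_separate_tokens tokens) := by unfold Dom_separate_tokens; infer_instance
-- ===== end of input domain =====

-- B replaces A's single-pass if/elif accumulation with three independent filtering passes (idiomatic; same cost).

-- ===== PORT A =====
-- A: one loop, three accumulators appended to in turn (if/elif/elif, other tokens dropped).
def separate_tokens (tokens : List (String × Int × Int)) : (List (String × Int × Int)) × (List (String × Int × Int)) × (List (String × Int × Int)) :=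
  tokens.foldl
    (fun acc token =>
      if token.1 == "r" then (acc.1 ++ [token], acc.2.1, acc.2.2)
      else if token.1 == "p" then (acc.1, acc.2.1 ++ [token], acc.2.2)
      else if token.1 == "s" then (acc.1, acc.2.1, acc.2.2 ++ [token])
      else acc)
    ([], [], [])

-- ===== PORT B =====
-- B: three independent filters over the full list.
def separate_tokens_alt (tokens : List (String × Int × Int)) : (List (String × Int × Int)) × (List (String × Int × Int)) × (List (String × Int × Int)) :=
  (tokens.filter (fun t => t.1 == "r"),
   tokens.filter (fun t => t.1 == "p"),
   tokens.filter (fun t => t.1 == "s"))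

-- ===== PRECONDITION & SPEC =====
def Spec_separate_tokens (tokens : List (String × Int × Int)) (out : (List (String × Int × Int)) × (List (String × Int × Int)) × (List (String × Int × Int))) : Prop := out = separate_tokens_alt tokens
instance (tokens : List (String × Int × Int)) (out : (List (String × Int × Int)) × (List (String × Int × Int)) × (List (String × Int × Int))) : Decidable (Spec_separate_tokens tokens out) := by unfold Spec_separate_tokens; infer_instance

-- ===== CLAIM (what is proved, stated in full; the proofs are below) =====
def Claim_equal_separate_tokens : Prop := ∀ (tokens : List (String × Int × Int)), Dom_separate_tokens tokens → Spec_separate_tokens tokens (separate_tokens tokens)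

-- ===== LEMMAS AND PROOFS =====

-- Loop invariant: folding from any accumulator appends the three filters of the remaining list.
theorem separate_tokens_foldl_inv (tokens : List (String × Int × Int))
    (r p s : List (String × Int × Int)) :
    tokens.foldl
      (fun acc token =>
        if token.1 == "r" then (acc.1 ++ [token], acc.2.1, acc.2.2)
        else if token.1 == "p" then (acc.1, acc.2.1 ++ [token], acc.2.2)
        else if token.1 == "s" then (acc.1, acc.2.1, acc.2.2 ++ [token])
        else acc)
      (r, p, s)
    = (r ++ tokens.filter (fun t => t.1 == "r"),
       p ++ tokens.filter (fun t => t.1 == "p"),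
       s ++ tokens.filter (fun t => t.1 == "s")) := by
  induction tokens generalizing r p s with
  | nil => simp
  | cons t ts ih =>
    simp only [List.foldl_cons, List.filter_cons]
    by_cases h1 : t.1 == "r" <;> by_cases h2 : t.1 == "p" <;> by_cases h3 : t.1 == "s" <;>
      simp_all [ih]

-- ===== VERDICT (by name: the statement is the Claim_ definition above) =====
theorem separate_tokens_spec : Claim_equal_separate_tokens := by
  intro tokens _
  unfold Spec_separate_tokens separate_tokens separate_tokens_alt
  simpa using separate_tokens_foldl_inv tokens [] [] []
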